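-- pv_equiv track=rewrite | github.com/kjy4926/Algorithm-Study | 프로그래머스/2021_dev/memory.py | solution
-- ===== SOURCE A (Python) =====
-- def solution(param0) :
--     answer = ''
--     result = []
--     byte = ''
--
--     for p in param0 :
--         l = len(byte)
--         if l > 128 :
--             return 'HALT'
--         if p == 'BOOL' :
--             byte += '#'
--         if p == 'SHORT' :
--             if l % 2 == 0 :
--                 byte += '##'
--             else :
--                 byte += '.'
--                 byte += '##'
--         if p == 'FLOAT' :
--             c = l % 4
--             if c == 0 :
--                 byte += '####'
--             else :
--                 byte += ('.' * c)
--                 byte += '####'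
--         if p == 'INT' :
--             c = l % 8
--             if c == 0 :
--                 byte += '########'
--             else :
--                 byte += ('.' * c)
--                 byte += '########'
--         if p == 'LONG' :
--             c = l % 8
--             if c == 0 :
--                 byte += '########'
--                 byte += '########'
--             else :
--                 byte += ('.' * c)
--                 byte += '########'
--                 byte += '########'
--
--     _str = ''
--     for b in byte :
--         _str += b
--         if len(_str) == 8 :
--             result.append(_str)
--             _str = ''
--     result.append(_str)
--
--     return ','.join(result)
-- ===== SOURCE B (Python) =====
-- def solution(param0):
--     spec = {'BOOL': (1, 1), 'SHORT': (2, 2), 'FLOAT': (4, 4),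
--             'INT': (8, 8), 'LONG': (8, 16)}
--     byte = ''
--     for p in param0:
--         if len(byte) > 128:
--             return 'HALT'
--         if p in spec:
--             align, size = spec[p]
--             byte += '.' * (len(byte) % align) + '#' * size
--     parts = []
--     while len(byte) >= 8:
--         parts.append(byte[:8])
--         byte = byte[8:]
--     parts.append(byte)
--     return ','.join(parts)
-- ===== Notes on version B (the rewrite author's own statement) =====
-- stated objective: simpler
-- what changed: Replaces A's five per-type conditional blocks by a single table lookup with a uniform padding formula '.'*(len%align)+'#'*size, and A's char-by-char group-of-8 accumulator by a while loop slicing 8 characters at a time.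
import Mathlib
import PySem

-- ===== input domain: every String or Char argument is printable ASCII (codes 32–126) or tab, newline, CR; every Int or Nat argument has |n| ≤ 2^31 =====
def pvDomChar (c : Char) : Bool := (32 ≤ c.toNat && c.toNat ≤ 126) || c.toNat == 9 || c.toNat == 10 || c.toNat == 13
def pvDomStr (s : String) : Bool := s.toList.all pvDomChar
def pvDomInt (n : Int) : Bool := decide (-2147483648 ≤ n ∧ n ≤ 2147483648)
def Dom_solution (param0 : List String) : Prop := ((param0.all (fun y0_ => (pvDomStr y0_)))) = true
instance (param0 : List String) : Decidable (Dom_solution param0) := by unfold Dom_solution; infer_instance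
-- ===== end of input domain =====

-- B replaces A's five per-type branch blocks by one table lookup with a uniform
-- padding formula, and the char-by-char 8-accumulator by slicing 8 at a time (objective: simpler).

-- ===== PORT A =====
-- one loop iteration of A: the chain of independent `if` blocks, l captured first
def stepA (byte : List Char) (p : String) : List Char :=
  let l := byte.length
  let byte := if p == "BOOL" then byte ++ ['#'] else byte
  let byte := if p == "SHORT" then
      (if l % 2 == 0 then byte ++ ['#', '#'] else byte ++ ['.'] ++ ['#', '#']) else byte
  let byte := if p == "FLOAT" then
      (let c := l % 4
       if c == 0 then byte ++ List.replicate 4 '#'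
       else byte ++ List.replicate c '.' ++ List.replicate 4 '#') else byte
  let byte := if p == "INT" then
      (let c := l % 8
       if c == 0 then byte ++ List.replicate 8 '#'
       else byte ++ List.replicate c '.' ++ List.replicate 8 '#') else byte
  let byte := if p == "LONG" then
      (let c := l % 8
       if c == 0 then byte ++ List.replicate 8 '#' ++ List.replicate 8 '#'
       else byte ++ List.replicate c '.' ++ List.replicate 8 '#' ++ List.replicate 8 '#') else byte
  byte

-- A's main loop with the early `return 'HALT'` (none = HALT)
def loopA : List String → List Char → Option (List Char)
  | [], byte => some byte
  | p :: rest, byte => if byte.length > 128 then none else loopA rest (stepA byte p)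

-- A's second loop: char-by-char accumulation into `_str`, flushed at length 8,
-- with the unconditional trailing append
def chunkA (byte : List Char) : List (List Char) :=
  let rs := byte.foldl (fun (acc : List (List Char) × List Char) b =>
      let s := acc.2 ++ [b]
      if s.length == 8 then (acc.1 ++ [s], []) else (acc.1, s)) ([], [])
  rs.1 ++ [rs.2]

def solution (param0 : List String) : String :=
  match loopA param0 [] with
  | none => "HALT"
  | some byte => String.ofList (PySem.Chars.join [','] (chunkA byte))

-- ===== PORT B =====
def specB : PySem.Dict String (Nat × Nat) :=
  PySem.Dict.ofList [("BOOL", (1, 1)), ("SHORT", (2, 2)), ("FLOAT", (4, 4)),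
                     ("INT", (8, 8)), ("LONG", (8, 16))]

def stepB (byte : List Char) (p : String) : List Char :=
  match specB.get? p with
  | some (align, size) => byte ++ List.replicate (byte.length % align) '.' ++ List.replicate size '#'
  | none => byte

def loopB : List String → List Char → Option (List Char)
  | [], byte => some byte
  | p :: rest, byte => if byte.length > 128 then none else loopB rest (stepB byte p)

-- B's while loop: slice off 8 chars at a time, then the final (possibly empty) part
def grpB (byte : List Char) : List (List Char) :=
  if byte.length ≥ 8 then byte.take 8 :: grpB (byte.drop 8) else [byte]
termination_by byte.length
decreasing_by simp; omega

def solution_alt (param0 : List String) : String :=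
  match loopB param0 [] with
  | none => "HALT"
  | some byte => String.ofList (PySem.Chars.join [','] (grpB byte))

-- ===== PRECONDITION & SPEC =====
def Spec_solution (param0 : List String) (out : String) : Prop := out = solution_alt param0
instance (param0 : List String) (out : String) : Decidable (Spec_solution param0 out) := by unfold Spec_solution; infer_instance

-- ===== CLAIM (what is proved, stated in full; the proofs are below) =====
def Claim_equal_solution : Prop := ∀ (param0 : List String), Dom_solution param0 → Spec_solution param0 (solution param0)

-- ===== LEMMAS AND PROOFS =====

theorem specB_get?_none (p : String) (h1 : ¬p = "BOOL") (h2 : ¬p = "SHORT")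
    (h3 : ¬p = "FLOAT") (h4 : ¬p = "INT") (h5 : ¬p = "LONG") : specB.get? p = none := by
  simp [specB, PySem.Dict.ofList, PySem.Dict.update, PySem.Dict.get?_insert,
        PySem.Dict.get?_empty, h1, h2, h3, h4, h5]

theorem stepA_eq_stepB (byte : List Char) (p : String) : stepA byte p = stepB byte p := by
  by_cases h1 : p = "BOOL"
  · have hg : specB.get? "BOOL" = some (1, 1) := by decide
    subst h1; simp [stepA, stepB, hg, Nat.mod_one]
  by_cases h2 : p = "SHORT"
  · have hg : specB.get? "SHORT" = some (2, 2) := by decide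
    subst h2
    by_cases h : byte.length % 2 = 0
    · simp [stepA, stepB, hg, h, List.replicate]
    · have h' : byte.length % 2 = 1 := by omega
      simp [stepA, stepB, hg, h', List.replicate]
  by_cases h3 : p = "FLOAT"
  · have hg : specB.get? "FLOAT" = some (4, 4) := by decide
    subst h3
    by_cases h : byte.length % 4 = 0
    · simp [stepA, stepB, hg, h]
    · simp [stepA, stepB, hg, h]
  by_cases h4 : p = "INT"
  · have hg : specB.get? "INT" = some (8, 8) := by decide
    subst h4
    by_cases h : byte.length % 8 = 0
    · simp [stepA, stepB, hg, h]
    · simp [stepA, stepB, hg, h]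
  by_cases h5 : p = "LONG"
  · have hg : specB.get? "LONG" = some (8, 16) := by decide
    subst h5
    have hrep : List.replicate 16 '#' = List.replicate 8 '#' ++ List.replicate 8 '#' := by decide
    by_cases h : byte.length % 8 = 0
    · simp [stepA, stepB, hg, h, hrep]
    · simp [stepA, stepB, hg, h, hrep]
  · simp [stepA, stepB, specB_get?_none p h1 h2 h3 h4 h5, h1, h2, h3, h4, h5]

theorem loopA_eq_loopB (ps : List String) : ∀ byte, loopA ps byte = loopB ps byte := by
  induction ps with
  | nil => intro byte; rfl
  | cons p rest ih => intro byte; simp [loopA, loopB, stepA_eq_stepB, ih]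

theorem chunkA_fold (xs : List Char) : ∀ (res : List (List Char)) (cur : List Char),
    cur.length < 8 →
    (let rs := xs.foldl (fun (acc : List (List Char) × List Char) b =>
        let s := acc.2 ++ [b]
        if s.length == 8 then (acc.1 ++ [s], []) else (acc.1, s)) (res, cur)
     rs.1 ++ [rs.2]) = res ++ grpB (cur ++ xs) := by
  induction xs with
  | nil =>
    intro res cur h
    rw [grpB]
    simp [Nat.not_le.mpr h]
  | cons x xs ih =>
    intro res cur h
    simp only [List.foldl_cons]
    by_cases hlen : (cur ++ [x]).length = 8
    · rw [if_pos (by simpa using hlen)]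
      have := ih (res ++ [cur ++ [x]]) [] (by simp)
      simp only [List.nil_append] at this
      rw [this]
      have hrhs : grpB (cur ++ x :: xs) = (cur ++ [x]) :: grpB xs := by
        have hsplit : cur ++ x :: xs = (cur ++ [x]) ++ xs := by simp
        rw [hsplit, grpB, if_pos (by simp at hlen ⊢; omega)]
        congr 1
        · rw [← hlen]; exact List.take_left
        · congr 1; rw [← hlen]; exact List.drop_left
      rw [hrhs]
      simp
    · rw [if_neg (by simpa using hlen)]
      have hl : (cur ++ [x]).length < 8 := by simp at hlen ⊢; omega
      rw [ih res (cur ++ [x]) hl]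
      simp

theorem chunkA_eq_grpB (byte : List Char) : chunkA byte = grpB byte := by
  have := chunkA_fold byte [] [] (by simp)
  simpa [chunkA] using this

-- ===== VERDICT (by name: the statement is the Claim_ definition above) =====
theorem solution_spec : Claim_equal_solution := by
  intro param0 _
  unfold Spec_solution solution solution_alt
  rw [loopA_eq_loopB]
  cases loopB param0 [] with
  | none => rfl
  | some byte => simp [chunkA_eq_grpB]
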